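-- pv_equiv track=rewrite | github.com/uAlek1/Labs | KMZI/rsa_attack/attack2.py | cf_expansion
-- ===== SOURCE A (Python) =====
-- def cf_expansion(nm: int, dn:int, l:int) -> list:
--     cf = []
--     a, r = nm // dn, nm % dn
--     cf.append(a)
--     i = 0
--     while r != 0 and i < l:
--         nm, dn = dn, r
--         a = nm // dn
--         r = nm % dn
--         cf.append(a)
--         i+=1
--     return cf
-- ===== SOURCE B (Python) =====
-- def cf_expansion(nm: int, dn: int, l: int) -> list:
--     q, r = divmod(nm, dn)
--     if r == 0 or l <= 0:
--         return [q]
--     return [q] + cf_expansion(dn, r, l - 1)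
-- ===== Notes on version B (the rewrite author's own statement) =====
-- stated objective: simpler
-- what changed: Replaced the explicit while-loop with counter i and list accumulator by a direct recursion on the Euclidean remainder (divmod once, base case on r == 0 or l <= 0), building the list back-to-front via list concatenation.
import Mathlib
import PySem

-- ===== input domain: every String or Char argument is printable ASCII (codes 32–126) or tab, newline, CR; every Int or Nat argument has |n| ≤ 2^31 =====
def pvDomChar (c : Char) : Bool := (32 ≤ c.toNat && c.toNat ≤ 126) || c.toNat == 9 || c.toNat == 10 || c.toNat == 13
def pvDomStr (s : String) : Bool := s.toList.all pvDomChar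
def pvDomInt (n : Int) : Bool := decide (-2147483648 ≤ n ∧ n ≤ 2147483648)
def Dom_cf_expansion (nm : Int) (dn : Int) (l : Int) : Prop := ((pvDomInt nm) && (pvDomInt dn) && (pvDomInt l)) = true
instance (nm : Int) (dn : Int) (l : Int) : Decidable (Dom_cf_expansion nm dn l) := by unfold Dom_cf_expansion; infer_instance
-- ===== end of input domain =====

-- B replaces A's while-loop with counter i by a direct recursion on the Euclidean remainder (simpler decomposition; same cost).

-- |a % b| < |b| for b ≠ 0 (Python mod); used for termination of both ports.
theorem pvModNatAbsLt (a b : Int) (hb : b ≠ 0) : (PySem.Int.mod a b).natAbs < b.natAbs := by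
  rcases lt_or_gt_of_ne hb with h | h
  · have := PySem.Int.mod_neg_bounds a h
    omega
  · have h1 := PySem.Int.mod_nonneg a h
    have h2 := PySem.Int.mod_lt a h
    omega

-- ===== PORT A =====
-- A's while-loop; live state is (dn, r, i, cf) (nm is dead after the first step, since the loop sets nm := dn).
def cfLoopA (dn r i l : Int) (cf : List Int) : List Int :=
  if _h : r ≠ 0 ∧ i < l then
    cfLoopA r (PySem.Int.mod dn r) (i + 1) l (cf ++ [PySem.Int.floordiv dn r])
  else cf
termination_by r.natAbs
decreasing_by exact pvModNatAbsLt dn r _h.1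

def cf_expansion (nm : Int) (dn : Int) (l : Int) : List Int :=
  cfLoopA dn (PySem.Int.mod nm dn) 0 l [PySem.Int.floordiv nm dn]

-- ===== PORT B =====
def cf_expansion_alt (nm : Int) (dn : Int) (l : Int) : List Int :=
  match h : PySem.Int.divmod? nm dn with
  | none => []  -- Python raises ZeroDivisionError here (dn = 0); excluded by Pre_
  | some (q, r) =>
    if r = 0 ∨ l ≤ 0 then [q]
    else [q] ++ cf_expansion_alt dn r (l - 1)
termination_by dn.natAbs
decreasing_by
  simp only [PySem.Int.divmod?] at h
  split at h
  · exact absurd h (by simp)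
  · rename_i hdn
    have hr : r = PySem.Int.mod nm dn := by
      simp only [Option.some.injEq, Prod.mk.injEq] at h; exact h.2.symm
    subst hr
    exact pvModNatAbsLt nm dn hdn

-- ===== PRECONDITION & SPEC =====
-- Pre_ excludes dn = 0, where Python A raises ZeroDivisionError.
def Pre_cf_expansion (nm : Int) (dn : Int) (l : Int) : Prop := dn ≠ 0
instance (nm : Int) (dn : Int) (l : Int) : Decidable (Pre_cf_expansion nm dn l) := by unfold Pre_cf_expansion; infer_instance
def pvWitness_cf_expansion : Int × Int × Int := (355, 113, 10)

def Spec_cf_expansion (nm : Int) (dn : Int) (l : Int) (out : List Int) : Prop := out = cf_expansion_alt nm dn l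
instance (nm : Int) (dn : Int) (l : Int) (out : List Int) : Decidable (Spec_cf_expansion nm dn l out) := by unfold Spec_cf_expansion; infer_instance

-- ===== CLAIM (what is proved, stated in full; the proofs are below) =====
def Claim_equal_cf_expansion : Prop := ∀ (nm : Int) (dn : Int) (l : Int), Dom_cf_expansion nm dn l → Pre_cf_expansion nm dn l → Spec_cf_expansion nm dn l (cf_expansion nm dn l)

-- ===== LEMMAS AND PROOFS =====

-- the tail of the expansion after the first quotient, as a function of the remaining budget m
def cfTail (dn r m : Int) : List Int :=
  if r = 0 ∨ m ≤ 0 then []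
  else PySem.Int.floordiv dn r :: cfTail r (PySem.Int.mod dn r) (m - 1)
termination_by r.natAbs
decreasing_by
  rename_i h
  exact pvModNatAbsLt dn r (by tauto)

theorem cfLoopA_eq_tail_aux (n : Nat) : ∀ (dn r i l : Int) (cf : List Int), r.natAbs ≤ n →
    cfLoopA dn r i l cf = cf ++ cfTail dn r (l - i) := by
  induction n with
  | zero =>
    intro dn r i l cf hle
    have hr : r = 0 := by omega
    rw [cfLoopA, dif_neg (by simp [hr]), cfTail, if_pos (Or.inl hr)]
    simp
  | succ n ih =>
    intro dn r i l cf hle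
    by_cases h : r ≠ 0 ∧ i < l
    · rw [cfLoopA, dif_pos h]
      have hlt := pvModNatAbsLt dn r h.1
      rw [ih r (PySem.Int.mod dn r) (i + 1) l (cf ++ [PySem.Int.floordiv dn r]) (by omega)]
      conv_rhs => rw [cfTail]
      rw [if_neg (by omega)]
      have he : l - (i + 1) = l - i - 1 := by omega
      simp [he]
    · rw [cfLoopA, dif_neg h, cfTail]
      rcases not_and_or.mp h with h1 | h2
      · rw [if_pos (Or.inl (not_not.mp h1))]; simp
      · rw [if_pos (Or.inr (by omega))]; simp

theorem cfLoopA_eq_tail (dn r i l : Int) (cf : List Int) :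
    cfLoopA dn r i l cf = cf ++ cfTail dn r (l - i) :=
  cfLoopA_eq_tail_aux r.natAbs dn r i l cf le_rfl

theorem alt_unfold (nm dn l : Int) (hdn : dn ≠ 0) :
    cf_expansion_alt nm dn l =
      (if PySem.Int.mod nm dn = 0 ∨ l ≤ 0 then [PySem.Int.floordiv nm dn]
       else [PySem.Int.floordiv nm dn] ++ cf_expansion_alt dn (PySem.Int.mod nm dn) (l - 1)) := by
  rw [cf_expansion_alt]
  split
  · rename_i heq
    rw [PySem.Int.divmod?, if_neg hdn] at heq
    exact absurd heq (by simp)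
  · rename_i q r heq
    rw [PySem.Int.divmod?, if_neg hdn] at heq
    simp only [Option.some.injEq, Prod.mk.injEq] at heq
    obtain ⟨hq, hr⟩ := heq
    subst hq; subst hr
    simp [PySem.Int.floordiv, PySem.Int.mod]

theorem alt_eq_tail_aux (n : Nat) : ∀ (nm dn l : Int), dn.natAbs ≤ n → dn ≠ 0 →
    cf_expansion_alt nm dn l = PySem.Int.floordiv nm dn :: cfTail dn (PySem.Int.mod nm dn) l := by
  induction n with
  | zero => intro nm dn l hle hdn; omega
  | succ n ih =>
    intro nm dn l hle hdn
    rw [alt_unfold nm dn l hdn, cfTail]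
    by_cases hc : PySem.Int.mod nm dn = 0 ∨ l ≤ 0
    · rw [if_pos hc, if_pos hc]
    · rw [if_neg hc, if_neg hc]
      have hr0 : PySem.Int.mod nm dn ≠ 0 := fun h0 => hc (Or.inl h0)
      have hlt := pvModNatAbsLt nm dn hdn
      rw [ih dn (PySem.Int.mod nm dn) (l - 1) (by omega) hr0]
      simp

theorem alt_eq_tail (nm dn l : Int) (hdn : dn ≠ 0) :
    cf_expansion_alt nm dn l = PySem.Int.floordiv nm dn :: cfTail dn (PySem.Int.mod nm dn) l :=
  alt_eq_tail_aux dn.natAbs nm dn l le_rfl hdn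

-- ===== VERDICT (by name: the statement is the Claim_ definition above) =====
theorem cf_expansion_spec : Claim_equal_cf_expansion := by
  intro nm dn l _ hpre
  unfold Spec_cf_expansion cf_expansion
  rw [cfLoopA_eq_tail, alt_eq_tail nm dn l hpre]
  simp
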